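-- pv_equiv track=rewrite | github.com/groupurke/gurke | gurke.py | copath
-- ===== SOURCE A (Python) =====
-- def path(leaf:int):
--         """leaf: index of the leaf"""
--         path = []
--         a = leaf + 1#self.leaves - 1
--         while a != 1:
--             path.append(a-1)
--             a //= 2
--         path.append(0)
--         path.reverse()
--         return path
--
-- def copath(leaf:int):
--     """returns the copath of a leaf"""
--     pat = path(leaf)
--     copath = []
--     for i in range(1, len(pat)):
--         p = pat[i]
--         cop = p+1 if (p%2 != 0) else p-1
--         copath.append(cop)
--     return copath
-- ===== SOURCE B (Python) =====
-- def copath(leaf: int):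
--     """returns the copath of a leaf"""
--     b = bin(leaf + 1)[2:]
--     cop = []
--     for i in range(2, len(b) + 1):
--         v = int(b[:i], 2)
--         cop.append(v if v % 2 == 0 else v - 2)
--     return cop
-- ===== Notes on version B (the rewrite author's own statement) =====
-- stated objective: alternative
-- what changed: B reads the node index's binary representation once (bin) and computes each copath entry independently by parsing a binary prefix with int(.,2) (an ancestor in a complete binary tree is a bit-prefix of the node), emitting root-to-leaf order directly; A's halving loop, materialized path list, reverse and index scan are all gone.
import Mathlib
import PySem

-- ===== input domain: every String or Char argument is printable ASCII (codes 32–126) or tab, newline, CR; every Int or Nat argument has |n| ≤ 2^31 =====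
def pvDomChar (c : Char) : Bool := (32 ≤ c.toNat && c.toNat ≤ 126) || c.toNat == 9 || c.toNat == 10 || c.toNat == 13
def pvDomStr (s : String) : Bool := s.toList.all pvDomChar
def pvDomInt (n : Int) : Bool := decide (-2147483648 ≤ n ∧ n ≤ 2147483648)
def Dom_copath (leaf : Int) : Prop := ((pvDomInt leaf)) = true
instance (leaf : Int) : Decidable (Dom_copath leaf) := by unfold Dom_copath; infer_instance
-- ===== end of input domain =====

-- B computes each copath entry from a binary PREFIX of the node index (via bin/int(.,2))
-- instead of A's halving loop + path list + reverse + index scan; objective: alternative.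

-- ===== PORT A =====
-- 'while a != 1: path.append(a-1); a //= 2' — the guard 'a ≤ 1' only totalises the loop:
-- for a ≥ 1 it coincides with 'a = 1', and for a ≤ 0 (leaf < 0) the Python loop never terminates.
def pathLoopA (a : Int) (acc : List Int) : List Int :=
  if a ≤ 1 then acc
  else pathLoopA (PySem.Int.floordiv a 2) (acc ++ [a - 1])
termination_by a.toNat
decreasing_by
  rw [PySem.Int.floordiv_eq_ediv_of_pos (by omega : (0:Int) < 2)]
  omega

def pathA (leaf : Int) : List Int :=
  ((pathLoopA (leaf + 1) []) ++ [0]).reverse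

def copath (leaf : Int) : List Int :=
  let pat := pathA leaf
  (PySem.List.pyRange 1 (pat.length : Int) 1).foldl
    (fun acc i =>
      let p := PySem.List.pyGetD pat i 0
      acc ++ [if PySem.Int.mod p 2 ≠ 0 then p + 1 else p - 1]) []

-- ===== PORT B =====
-- bin(m)[2:] for m ≥ 1: big-endian binary digit characters (hand port, exact for m ≥ 1;
-- Pre_ restricts to leaf ≥ 0, i.e. leaf+1 ≥ 1).
def pvBinDigits (m : Nat) : List Char :=
  if h : m = 0 then [] else pvBinDigits (m / 2) ++ [if m % 2 = 1 then '1' else '0']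
decreasing_by exact Nat.div_lt_self (Nat.pos_of_ne_zero h) (by omega)

-- int(cs, 2) on a list of '0'/'1' characters (hand port of the base-2 parse, exact on such lists)
def pvOfBin (cs : List Char) : Int :=
  cs.foldl (fun v c => 2 * v + (if c = '1' then 1 else 0)) 0

def copath_alt (leaf : Int) : List Int :=
  let b := pvBinDigits (leaf + 1).toNat          -- b = bin(leaf+1)[2:], exact for leaf+1 ≥ 1
  (PySem.List.pyRange 2 ((b.length : Int) + 1) 1).foldl
    (fun acc i =>
      let v := pvOfBin (b.take i.toNat)          -- v = int(b[:i], 2); i ≥ 2 so take is exact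
      acc ++ [if PySem.Int.mod v 2 = 0 then v else v - 2]) []

-- ===== PRECONDITION & SPEC =====
-- Pre_ excludes exactly leaf < 0: there a = leaf+1 ≤ 0 and Python A's 'while a != 1' never terminates.
def Pre_copath (leaf : Int) : Prop := 0 ≤ leaf
instance (leaf : Int) : Decidable (Pre_copath leaf) := by unfold Pre_copath; infer_instance
def pvWitness_copath : Int := (5)

def Spec_copath (leaf : Int) (out : List Int) : Prop := out = copath_alt leaf
instance (leaf : Int) (out : List Int) : Decidable (Spec_copath leaf out) := by unfold Spec_copath; infer_instance

-- ===== CLAIM (what is proved, stated in full; the proofs are below) =====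
def Claim_equal_copath : Prop := ∀ (leaf : Int), Dom_copath leaf → Pre_copath leaf → Spec_copath leaf (copath leaf)

-- ===== LEMMAS AND PROOFS =====
def pvSib (p : Int) : Int := if PySem.Int.mod p 2 ≠ 0 then p + 1 else p - 1

-- top-down list of ancestors of m excluding the root (common reference shape for both sides)
def pvAncTD (m : Nat) : List Int :=
  if h : m ≤ 1 then [] else pvAncTD (m / 2) ++ [(m : Int)]
decreasing_by exact Nat.div_lt_self (by omega) (by omega)

theorem pvFd_toNat {a : Int} (h : ¬ a ≤ 1) {n : Nat} (ha : a.toNat ≤ n + 1) :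
    (PySem.Int.floordiv a 2).toNat ≤ n := by
  rw [PySem.Int.floordiv_eq_ediv_of_pos (by omega : (0:Int) < 2)]
  omega

theorem pvFd_natCast (m : Nat) :
    PySem.Int.floordiv (m : Int) 2 = ((m / 2 : Nat) : Int) := by
  rw [PySem.Int.floordiv_eq_ediv_of_pos (by omega : (0:Int) < 2)]
  omega

theorem pathLoopA_acc (n : Nat) : ∀ (a : Int), a.toNat ≤ n →
    ∀ acc, pathLoopA a acc = acc ++ pathLoopA a [] := by
  induction n with
  | zero =>
    intro a ha acc
    have h : a ≤ 1 := by omega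
    rw [pathLoopA]; conv_rhs => rw [pathLoopA]
    simp [h]
  | succ n ih =>
    intro a ha acc
    by_cases h : a ≤ 1
    · rw [pathLoopA]; conv_rhs => rw [pathLoopA]
      simp [h]
    · rw [pathLoopA]; conv_rhs => rw [pathLoopA]
      simp only [if_neg h]
      rw [ih _ (pvFd_toNat h ha) (acc ++ [a - 1]), ih _ (pvFd_toNat h ha) ([] ++ [a - 1])]
      simp

theorem foldl_append_map {α : Type} (f : α → Int) (xs : List α) (acc : List Int) :
    xs.foldl (fun acc p => acc ++ [f p]) acc = acc ++ xs.map f := by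
  induction xs generalizing acc with
  | nil => simp
  | cons x xs ih => simp [List.foldl, ih]

-- A's reversed loop output = ancestors-top-down, each minus one
theorem pathLoopA_reverse_eq (m : Nat) :
    (pathLoopA (m : Int) []).reverse = (pvAncTD m).map (fun a => a - 1) := by
  induction m using Nat.strong_induction_on with
  | _ m ih =>
    by_cases h : m ≤ 1
    · rw [pathLoopA, pvAncTD]
      simp [h, show (m : Int) ≤ 1 by omega]
    · rw [pathLoopA, pvAncTD]
      rw [if_neg (show ¬ (m : Int) ≤ 1 by omega), dif_neg h]
      rw [pathLoopA_acc (PySem.Int.floordiv (m : Int) 2).toNat _ le_rfl]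
      rw [pvFd_natCast m]
      simp only [List.nil_append, List.reverse_append, List.reverse_cons, List.reverse_nil]
      rw [ih (m / 2) (Nat.div_lt_self (by omega) (by omega))]
      simp

theorem pvSib_pred (a : Int) :
    pvSib (a - 1) = if PySem.Int.mod a 2 = 0 then a else a - 2 := by
  unfold pvSib
  rw [PySem.Int.mod_eq_emod_of_pos (by omega : (0:Int) < 2),
      PySem.Int.mod_eq_emod_of_pos (by omega : (0:Int) < 2)]
  have h := Int.emod_two_eq a
  have h2 : (a - 1) % 2 = (a + 1) % 2 := by omega
  rcases h with h | h <;> split_ifs with h1 <;> omega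

theorem pvOfBin_binDigits (m : Nat) : pvOfBin (pvBinDigits m) = (m : Int) := by
  induction m using Nat.strong_induction_on with
  | _ m ih =>
    by_cases h : m = 0
    · rw [pvBinDigits]; simp [h, pvOfBin]
    · rw [pvBinDigits, dif_neg h]
      unfold pvOfBin
      rw [List.foldl_append]
      rw [show (pvBinDigits (m / 2)).foldl (fun v c => 2 * v + (if c = '1' then 1 else 0)) 0
            = pvOfBin (pvBinDigits (m / 2)) from rfl]
      rw [ih (m / 2) (Nat.div_lt_self (Nat.pos_of_ne_zero h) (by omega))]
      simp only [List.foldl_cons, List.foldl_nil]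
      by_cases hp : m % 2 = 1 <;> simp [hp] <;> omega

theorem pvBinDigits_len_pos {m : Nat} (h : m ≠ 0) : 1 ≤ (pvBinDigits m).length := by
  rw [pvBinDigits, dif_neg h]
  simp

-- B's prefix values = ancestors-top-down
theorem prefix_vals_eq (m : Nat) (hm : 1 ≤ m) :
    (PySem.List.pyRange 2 (((pvBinDigits m).length : Int) + 1) 1).map
      (fun i => pvOfBin ((pvBinDigits m).take i.toNat)) = pvAncTD m := by
  induction m using Nat.strong_induction_on with
  | _ m ih =>
    by_cases h : m ≤ 1
    · have hm1 : m = 1 := by omega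
      subst hm1
      rw [pvAncTD]
      rw [show pvBinDigits 1 = ['1'] from by rw [pvBinDigits]; simp [pvBinDigits]]
      simp [PySem.List.pyRange_one_eq_nil]
    · -- m ≥ 2
      have hrec : pvBinDigits m
          = pvBinDigits (m / 2) ++ [if m % 2 = 1 then '1' else '0'] := by
        rw [pvBinDigits, dif_neg (show m ≠ 0 by omega)]
      have hL : 1 ≤ (pvBinDigits (m / 2)).length :=
        pvBinDigits_len_pos (by omega)
      set d := pvBinDigits (m / 2) with hd
      set L : Nat := d.length with hLdef
      have hlen : (pvBinDigits m).length = L + 1 := by rw [hrec]; simp [hLdef]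
      rw [hlen]
      push_cast
      have hsplit : PySem.List.pyRange 2 ((L : Int) + 1 + 1) 1
          = PySem.List.pyRange 2 ((L : Int) + 1) 1 ++ [(L : Int) + 1] := by
        exact PySem.List.pyRange_one_succ_right (by omega)
      rw [hsplit, List.map_append]
      rw [pvAncTD, dif_neg h]
      congr 1
      · -- middle prefixes only see d
        have hmap : ∀ i ∈ PySem.List.pyRange 2 ((L : Int) + 1) 1,
            pvOfBin ((pvBinDigits m).take i.toNat) = pvOfBin (d.take i.toNat) := by
          intro i hi
          rw [PySem.List.mem_pyRange_one] at hi
          rw [hrec, List.take_append_of_le_length (by omega : i.toNat ≤ d.length)]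
        rw [List.map_congr_left hmap]
        exact ih (m / 2) (Nat.div_lt_self (by omega) (by omega)) (by omega)
      · -- last prefix is the whole string, value m
        simp only [List.map_cons, List.map_nil]
        congr 1
        rw [show ((L : Int) + 1).toNat = L + 1 by omega]
        rw [← hlen, List.take_length]
        exact pvOfBin_binDigits m

-- elimination of A's second pass: copath = map pvSib over the reversed loop output
theorem copath_eq_map (leaf : Int) :
    copath leaf = ((pathLoopA (leaf + 1) []).reverse).map pvSib := by
  unfold copath pathA
  simp only []
  have hfold := PySem.List.foldl_pyRange_pyGetD'
    ((pathLoopA (leaf + 1) [] ++ [0]).reverse) 0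
    (fun acc p => acc ++ [if PySem.Int.mod p 2 ≠ 0 then p + 1 else p - 1])
    ([] : List Int) (show (0:Int) ≤ 1 by omega)
  simp only [] at hfold
  rw [hfold]
  rw [show (fun (acc : List Int) (p : Int) =>
        acc ++ [if PySem.Int.mod p 2 ≠ 0 then p + 1 else p - 1])
      = fun acc p => acc ++ [pvSib p] from by funext acc p; simp [pvSib]]
  rw [foldl_append_map]
  simp

-- ===== VERDICT (by name: the statement is the Claim_ definition above) =====
theorem copath_spec : Claim_equal_copath := by
  intro leaf _ hpre
  unfold Pre_copath at hpre
  unfold Spec_copath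
  -- A side: second pass eliminated, then loop output as ancestors-minus-one
  rw [copath_eq_map]
  have hn : leaf + 1 = ((leaf + 1).toNat : Int) := by omega
  set m : Nat := (leaf + 1).toNat with hm
  have hm1 : 1 ≤ m := by omega
  rw [hn, pathLoopA_reverse_eq m]
  -- B side: fold to map, then prefix values as ancestors
  unfold copath_alt
  simp only []
  have hB := foldl_append_map (fun i : Int =>
        if PySem.Int.mod (pvOfBin ((pvBinDigits (leaf + 1).toNat).take i.toNat)) 2 = 0
        then pvOfBin ((pvBinDigits (leaf + 1).toNat).take i.toNat)
        else pvOfBin ((pvBinDigits (leaf + 1).toNat).take i.toNat) - 2)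
     (PySem.List.pyRange 2 (((pvBinDigits (leaf + 1).toNat).length : Int) + 1) 1) []
  simp only [] at hB
  rw [hB, ← hm]
  simp only [List.nil_append, List.map_map]
  rw [← prefix_vals_eq m hm1]
  simp only [List.map_map]
  apply List.map_congr_left
  intro i _
  simp only [Function.comp_apply]
  exact pvSib_pred _
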